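-- pv_equiv track=rewrite | github.com/RimaSGH/SpartaV2 | spartaabc/external_utils.py | fill_unique_gaps_map
-- ===== SOURCE A (Python) =====
-- from typing import List, Dict, Tuple
--
-- def fill_unique_gaps_map(msa: List[str]) -> Dict[Tuple[int, int], List[int]]:
--     """
--     Replicate C++ fillUniqueGapsMap() logic exactly.
--
--     This function implements the same algorithm as the C++ code in
--     MsaStatsCalculator::fillUniqueGapsMap().
--
--     Args:
--         msa: List of aligned sequences (strings)
--
--     Returns:
--         Dictionary with key=(start_pos, end_pos), value=[length, count]
--         where length is the gap length and count is how many sequences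
--         have this exact gap pattern.
--     """
--     unique_indel_map = {}
--     num_sequences = len(msa)
--
--     if num_sequences == 0:
--         return unique_indel_map
--
--     msa_length = len(msa[0]) if msa[0] else 0
--
--     # Validate all sequences have same length
--     for j, seq in enumerate(msa):
--         if len(seq) != msa_length:
--             raise ValueError(f"MSA sequence {j} has length {len(seq)}, expected {msa_length}. All sequences must be aligned (same length).")
--
--     for j in range(num_sequences):
--         previous_is_indel = 0
--         curr_start_indel_point = -1
--         curr_end_indel_point = -1
--
--         for i in range(msa_length):
--             if msa[j][i] == '-' and previous_is_indel == 0: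
--                 # Start of new gap
--                 previous_is_indel = 1
--                 curr_start_indel_point = i
--                 curr_end_indel_point = i
--
--             elif msa[j][i] == '-' and previous_is_indel == 1:
--                 # Continue gap
--                 curr_end_indel_point += 1
--
--             else:
--                 # We're on a character (not gap)
--                 if curr_start_indel_point == -1:
--                     previous_is_indel = 0
--                     continue
--
--                 # We have an indel - put in map
--                 curr_pair = (curr_start_indel_point, curr_end_indel_point)
--                 curr_length = curr_end_indel_point - curr_start_indel_point + 1
--
--                 if curr_pair not in unique_indel_map:
--                     # New entry
--                     unique_indel_map[curr_pair] = [curr_length, 1]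
--                 else:
--                     # Already exists - raise counter
--                     unique_indel_map[curr_pair][1] += 1
--
--                 previous_is_indel = 0
--                 curr_start_indel_point = -1
--                 curr_end_indel_point = -1
--
--         # Handle gap at end of sequence
--         if curr_start_indel_point != -1:
--             curr_pair = (curr_start_indel_point, curr_end_indel_point)
--             curr_length = curr_end_indel_point - curr_start_indel_point + 1
--
--             if curr_pair not in unique_indel_map:
--                 unique_indel_map[curr_pair] = [curr_length, 1]
--             else:
--                 unique_indel_map[curr_pair][1] += 1
--
--     return unique_indel_map
-- ===== SOURCE B (Python) =====
-- from typing import List, Dict, Tuple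
--
-- def fill_unique_gaps_map(msa: List[str]) -> Dict[Tuple[int, int], List[int]]:
--     unique_indel_map = {}
--     if not msa:
--         return unique_indel_map
--     msa_length = len(msa[0])
--     for j, seq in enumerate(msa):
--         if len(seq) != msa_length:
--             raise ValueError(f"MSA sequence {j} has length {len(seq)}, expected {msa_length}. All sequences must be aligned (same length).")
--     for seq in msa:
--         # boundary detection: a gap run starts where '-' follows a non-'-' neighbour
--         # (pad with a space), and ends where '-' precedes a non-'-' neighbour.
--         starts = [i for i, (c, p) in enumerate(zip(seq, ' ' + seq)) if c == '-' and p != '-']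
--         ends = [i for i, (c, n) in enumerate(zip(seq, seq[1:] + ' ')) if c == '-' and n != '-']
--         for s, e in zip(starts, ends):
--             if (s, e) in unique_indel_map:
--                 unique_indel_map[(s, e)][1] += 1
--             else:
--                 unique_indel_map[(s, e)] = [e - s + 1, 1]
--     return unique_indel_map
-- ===== Notes on version B (the rewrite author's own statement) =====
-- stated objective: alternative
-- what changed: Replaces A's previous_is_indel state machine (with its duplicated end-of-sequence insertion) by boundary detection: gap-run starts and ends are read off per-character neighbor pairs (zip with the shifted sequence) as two comprehensions, then zip(starts, ends) yields the runs that update the map; no flag state and no post-loop special case.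
import Mathlib
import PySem

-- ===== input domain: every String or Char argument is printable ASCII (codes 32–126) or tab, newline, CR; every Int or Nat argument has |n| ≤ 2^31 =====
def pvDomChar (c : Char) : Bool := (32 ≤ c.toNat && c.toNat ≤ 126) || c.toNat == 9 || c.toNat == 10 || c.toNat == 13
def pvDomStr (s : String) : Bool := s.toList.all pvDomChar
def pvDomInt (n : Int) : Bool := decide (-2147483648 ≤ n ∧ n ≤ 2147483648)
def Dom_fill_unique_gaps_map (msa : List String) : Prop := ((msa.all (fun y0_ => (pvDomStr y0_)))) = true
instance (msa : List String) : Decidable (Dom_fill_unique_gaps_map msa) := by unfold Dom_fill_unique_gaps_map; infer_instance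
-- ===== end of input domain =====

-- B replaces A's previous_is_indel state machine (with its duplicated end-of-sequence
-- insertion) by boundary detection: gap-run starts and ends are read off neighbor pairs
-- and zipped together; a different decomposition of the same cost, not claimed faster.

-- ===== PORT A =====
-- unique_indel_map[curr_pair][1] += 1  (in-place bump of the second list element)
def aBump (v : List Int) : List Int :=
  match v with
  | l :: c :: t => l :: (c + 1) :: t
  | v => v

-- the shared "put gap into map" block of A (new entry / raise counter)
def aPut (s e : Int) (d : PySem.Dict (Int × Int) (List Int)) : PySem.Dict (Int × Int) (List Int) :=
  if d.contains (s, e) = false then d.insert (s, e) [e - s + 1, 1]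
  else d.modify (s, e) [] aBump

-- inner `for i in range(msa_length)` loop; state = (previous_is_indel, curr_start, curr_end, map);
-- iterates the sequence's characters (exact: under A's validation the length is msa_length)
def aLoop : List Char → Int → Int → Int → Int → PySem.Dict (Int × Int) (List Int) →
    Int × Int × PySem.Dict (Int × Int) (List Int)
  | [], _, _, s, e, d => (s, e, d)
  | c :: rest, i, prev, s, e, d =>
    if c = '-' ∧ prev = 0 then aLoop rest (i + 1) 1 i i d
    else if c = '-' ∧ prev = 1 then aLoop rest (i + 1) prev s (e + 1) d
    else if s = -1 then aLoop rest (i + 1) 0 s e d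
    else aLoop rest (i + 1) 0 (-1) (-1) (aPut s e d)

-- one sequence: the inner loop, then the gap-at-end-of-sequence block
def aSeq (d : PySem.Dict (Int × Int) (List Int)) (seq : String) :
    PySem.Dict (Int × Int) (List Int) :=
  let r := aLoop seq.toList 0 0 (-1) (-1) d
  if r.1 ≠ -1 then aPut r.1 r.2.1 r.2.2 else r.2.2

def fill_unique_gaps_map (msa : List String) : List (Int × Int × List Int) :=
  if msa.length = 0 then []
  else
    let msaLen := (msa.headD "").length
    if msa.all (fun seq => seq.length == msaLen) then
      ((msa.foldl aSeq PySem.Dict.empty).items).map (fun p => (p.1.1, p.1.2, p.2))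
    else []  -- Python raises ValueError here (outside Pre_)

-- ===== PORT B =====
def bBump (v : List Int) : List Int :=
  match v with
  | l :: c :: t => l :: (c + 1) :: t
  | v => v

-- B's map update (raise counter / new entry, in B's branch order)
def bPut (s e : Int) (d : PySem.Dict (Int × Int) (List Int)) : PySem.Dict (Int × Int) (List Int) :=
  if d.contains (s, e) then d.modify (s, e) [] bBump
  else d.insert (s, e) [e - s + 1, 1]

-- starts = [i for i, (c, p) in enumerate(zip(seq, ' ' + seq)) if c == '-' and p != '-']
def bStarts (cs : List Char) : List Int :=
  (PySem.List.enumerate (cs.zip (' ' :: cs))).filterMap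
    (fun x => if x.2.1 = '-' ∧ x.2.2 ≠ '-' then some x.1 else none)

-- ends = [i for i, (c, n) in enumerate(zip(seq, seq[1:] + ' ')) if c == '-' and n != '-']
def bEnds (cs : List Char) : List Int :=
  (PySem.List.enumerate (cs.zip (cs.tail ++ [' ']))).filterMap
    (fun x => if x.2.1 = '-' ∧ x.2.2 ≠ '-' then some x.1 else none)

-- one sequence: the two boundary lists, zipped and folded into the map
def bSeq (d : PySem.Dict (Int × Int) (List Int)) (seq : String) :
    PySem.Dict (Int × Int) (List Int) :=
  ((bStarts seq.toList).zip (bEnds seq.toList)).foldl (fun d p => bPut p.1 p.2 d) d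

def fill_unique_gaps_map_alt (msa : List String) : List (Int × Int × List Int) :=
  if msa.length = 0 then []
  else
    let msaLen := (msa.headD "").length
    if msa.all (fun seq => seq.length == msaLen) then
      ((msa.foldl bSeq PySem.Dict.empty).items).map (fun p => (p.1.1, p.1.2, p.2))
    else []  -- Python raises ValueError here (outside Pre_)

-- ===== PRECONDITION & SPEC =====
-- Pre_ excludes exactly the MSAs with sequences of differing lengths, on which A raises ValueError.
def Pre_fill_unique_gaps_map (msa : List String) : Prop :=
  ∀ s ∈ msa, s.length = (msa.headD "").length
instance (msa : List String) : Decidable (Pre_fill_unique_gaps_map msa) := by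
  unfold Pre_fill_unique_gaps_map; infer_instance

def pvWitness_fill_unique_gaps_map : List String := ["a--b-", "--ab-", "a--b-"]

def Spec_fill_unique_gaps_map (msa : List String) (out : List (Int × Int × List Int)) : Prop := out = fill_unique_gaps_map_alt msa
instance (msa : List String) (out : List (Int × Int × List Int)) : Decidable (Spec_fill_unique_gaps_map msa out) := by unfold Spec_fill_unique_gaps_map; infer_instance

-- ===== CLAIM (what is proved, stated in full; the proofs are below) =====
def Claim_equal_fill_unique_gaps_map : Prop := ∀ (msa : List String), Dom_fill_unique_gaps_map msa → Pre_fill_unique_gaps_map msa → Spec_fill_unique_gaps_map msa (fill_unique_gaps_map msa)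

-- ===== LEMMAS AND PROOFS =====

-- A's and B's map-update blocks agree (branch order swapped)
theorem put_eq (s e : Int) (d : PySem.Dict (Int × Int) (List Int)) : aPut s e d = bPut s e d := by
  unfold aPut bPut aBump bBump
  cases h : d.contains (s, e) <;> simp

def finishA (r : Int × Int × PySem.Dict (Int × Int) (List Int)) :
    PySem.Dict (Int × Int) (List Int) :=
  if r.1 ≠ -1 then aPut r.1 r.2.1 r.2.2 else r.2.2

def F (l : List (Int × Int)) (d : PySem.Dict (Int × Int) (List Int)) :
    PySem.Dict (Int × Int) (List Int) :=
  l.foldl (fun d p => bPut p.1 p.2 d) d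

-- run starts: index i with cs[i] = '-' and previous char (parameter p for the head) ≠ '-'
def sAux : List Char → Char → Int → List Int
  | [], _, _ => []
  | c :: r, p, i => if c = '-' ∧ p ≠ '-' then i :: sAux r c (i + 1) else sAux r c (i + 1)

-- run ends: index i with cs[i] = '-' and next char (or none) ≠ '-'
def eAux : List Char → Int → List Int
  | [], _ => []
  | [c], i => if c = '-' then [i] else []
  | c :: c' :: r, i =>
    if c = '-' ∧ c' ≠ '-' then i :: eAux (c' :: r) (i + 1) else eAux (c' :: r) (i + 1)

-- in-gap state: whether position i-1 (a '-') is a run end depends on the head of cs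
def ePend (cs : List Char) (i : Int) : List Int :=
  match cs with
  | [] => [i - 1]
  | c :: _ => if c = '-' then eAux cs i else (i - 1) :: eAux cs i

theorem bStarts_eq (cs : List Char) :
    ∀ (p : Char) (i : Int),
      (PySem.List.enumerate (cs.zip (p :: cs)) i).filterMap
        (fun x => if x.2.1 = '-' ∧ x.2.2 ≠ '-' then some x.1 else none) = sAux cs p i := by
  induction cs with
  | nil => intro p i; simp [sAux, PySem.List.enumerate_nil]
  | cons c r ih =>
    intro p i
    simp only [List.zip_cons_cons, PySem.List.enumerate_cons, List.filterMap_cons, sAux]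
    by_cases h : c = '-' ∧ p ≠ '-' <;> simp [h, ih]

theorem bEnds_eq (cs : List Char) :
    ∀ (i : Int),
      (PySem.List.enumerate (cs.zip (cs.tail ++ [' '])) i).filterMap
        (fun x => if x.2.1 = '-' ∧ x.2.2 ≠ '-' then some x.1 else none) = eAux cs i := by
  induction cs with
  | nil => intro i; simp [eAux, PySem.List.enumerate_nil]
  | cons c r ih =>
    intro i
    cases r with
    | nil =>
      simp only [List.tail_cons, List.nil_append, List.zip_cons_cons, List.zip_nil_left,
        PySem.List.enumerate_cons, PySem.List.enumerate_nil, List.filterMap_cons, eAux]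
      by_cases h : c = '-' <;> simp [h]
    | cons c' r' =>
      simp only [List.tail_cons, List.cons_append, List.zip_cons_cons,
        PySem.List.enumerate_cons, List.filterMap_cons, eAux]
      have := ih (i + 1)
      simp only [List.tail_cons] at this
      by_cases h : c = '-' ∧ c' ≠ '-' <;> simp [h, this]

-- core invariant: A's state machine, finished off by the end-of-sequence block,
-- equals folding B's zipped (start, end) boundary pairs — from both of A's states
theorem eAux_cons_nongap (c : Char) (rest : List Char) (i : Int) (hc : c ≠ '-') :
    eAux (c :: rest) i = eAux rest (i + 1) := by
  cases rest <;> simp [eAux, hc]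

theorem eAux_cons_gap (rest : List Char) (i : Int) :
    eAux ('-' :: rest) i = ePend rest (i + 1) := by
  cases rest with
  | nil => simp [eAux, ePend]
  | cons c' r' =>
    by_cases h' : c' = '-' <;> simp [eAux, ePend, h']

theorem loop_eq (cs : List Char) :
    ∀ (i : Int) (d : PySem.Dict (Int × Int) (List Int)), 0 ≤ i →
      (∀ p : Char, p ≠ '-' →
        finishA (aLoop cs i 0 (-1) (-1) d) = F ((sAux cs p i).zip (eAux cs i)) d) ∧
      (∀ s : Int, 0 ≤ s →
        finishA (aLoop cs i 1 s (i - 1) d) = F ((s :: sAux cs '-' i).zip (ePend cs i)) d) := by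
  induction cs with
  | nil =>
    intro i d hi
    constructor
    · intro p hp; simp [aLoop, sAux, eAux, finishA, F]
    · intro s hs
      have hne : s ≠ -1 := by omega
      simp [aLoop, sAux, ePend, finishA, F, hne, put_eq]
  | cons c rest ih =>
    intro i d hi
    have e1 : i + 1 - 1 = i := by ring
    constructor
    · intro p hp
      by_cases hc : c = '-'
      · have h2 := ((ih (i + 1) d (by omega)).2) i hi
        rw [e1] at h2
        simp only [aLoop, hc, and_self, if_pos]
        rw [h2]
        subst hc
        rw [eAux_cons_gap]
        simp [sAux, hp]
      · have h1 := ((ih (i + 1) d (by omega)).1) c hc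
        simp only [aLoop, hc, false_and, if_false]
        norm_num
        rw [h1, eAux_cons_nongap c rest i hc]
        simp [sAux, hc]
    · intro s hs
      by_cases hc : c = '-'
      · have h2 := ((ih (i + 1) d (by omega)).2) s hs
        rw [e1] at h2
        have e2 : i - 1 + 1 = i := by ring
        simp only [aLoop, hc, and_self, one_ne_zero, and_false, if_pos, if_false, e2]
        rw [h2]
        subst hc
        simp only [ePend, sAux]
        norm_num
        cases rest with
        | nil => simp [eAux]
        | cons c' r' => by_cases h' : c' = '-' <;> simp [eAux, h']
      · have h1 := ((ih (i + 1) (aPut s (i - 1) d) (by omega)).1) c hc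
        have hne : s ≠ -1 := by omega
        simp only [aLoop, hc, false_and, hne, one_ne_zero, and_false, if_neg,
          not_false_iff]
        rw [h1]
        simp [sAux, ePend, hc, F, put_eq, eAux_cons_nongap]

theorem seq_eq (d : PySem.Dict (Int × Int) (List Int)) (seq : String) :
    aSeq d seq = bSeq d seq := by
  have h := ((loop_eq seq.toList 0 d (by norm_num)).1) ' ' (by decide)
  unfold aSeq bSeq bStarts bEnds
  rw [bStarts_eq, bEnds_eq]
  exact h

-- ===== VERDICT (by name: the statement is the Claim_ definition above) =====
theorem fill_unique_gaps_map_spec : Claim_equal_fill_unique_gaps_map := by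
  intro msa _ _
  unfold Spec_fill_unique_gaps_map fill_unique_gaps_map fill_unique_gaps_map_alt
  have hseq : aSeq = bSeq := by funext d seq; exact seq_eq d seq
  rw [hseq]
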